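-- pv_equiv track=rewrite | github.com/Aikiooo/7dsGems | 7dsGems.py | weeklyCalc
-- ===== SOURCE A (Python) =====
-- def weeklyCalc(boolWeekly, days, startingDayWeekly):
--     if not boolWeekly:
--         return 0
--
--     if boolWeekly:
--         gemsFromWeekly = 0
--         iterations = 0
--         day = startingDayWeekly
--
--         while iterations < days:
--             gemsFromWeekly += 7
--             day += 1
--             if day > 7:
--                 gemsFromWeekly += 10
--                 day = 1
--             iterations += 1
--         return gemsFromWeekly
-- ===== SOURCE B (Python) =====
-- def weeklyCalc(boolWeekly, days, startingDayWeekly):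
--     if not boolWeekly or days <= 0:
--         return 0
--     # first iteration at which the bonus fires (day reaches 8), then every 7 iterations
--     first = max(1, 8 - startingDayWeekly)
--     bonuses = 0 if days < first else 1 + (days - first) // 7
--     return 7 * days + 10 * bonuses
-- ===== Notes on version B (the rewrite author's own statement) =====
-- stated objective: faster
-- what changed: Replaced the per-day while loop with a closed-form formula: 7*days plus 10 per bonus, counting bonuses as 1 + (days - first)//7 where first = max(1, 8 - startingDayWeekly).
import Mathlib
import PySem

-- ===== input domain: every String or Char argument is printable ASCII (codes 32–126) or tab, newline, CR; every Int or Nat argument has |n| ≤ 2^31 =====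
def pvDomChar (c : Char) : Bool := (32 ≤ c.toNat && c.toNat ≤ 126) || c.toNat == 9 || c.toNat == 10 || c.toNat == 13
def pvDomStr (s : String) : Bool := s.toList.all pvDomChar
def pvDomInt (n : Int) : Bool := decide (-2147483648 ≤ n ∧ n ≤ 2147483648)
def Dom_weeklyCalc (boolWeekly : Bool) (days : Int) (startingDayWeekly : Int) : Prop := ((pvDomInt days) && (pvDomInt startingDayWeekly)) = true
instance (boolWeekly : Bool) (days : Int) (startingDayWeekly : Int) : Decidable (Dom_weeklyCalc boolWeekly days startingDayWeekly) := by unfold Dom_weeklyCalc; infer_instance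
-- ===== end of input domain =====

-- B replaces A's per-day while loop by a closed-form formula (7*days plus 10 per bonus,
-- counted by floor division), intended to be faster by avoiding the loop.

-- ===== PORT A =====
-- A's while loop runs exactly max(days,0) times (iterations counts 0,1,… up to days),
-- so it is transliterated as structural recursion on days.toNat, carrying (gems, day).
def weeklyLoopA : Nat → Int → Int → Int
  | 0, gems, _ => gems
  | n + 1, gems, day =>
    let gems' := gems + 7
    let day' := day + 1
    if day' > 7 then weeklyLoopA n (gems' + 10) 1 else weeklyLoopA n gems' day'

def weeklyCalc (boolWeekly : Bool) (days : Int) (startingDayWeekly : Int) : Int :=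
  if !boolWeekly then 0
  else weeklyLoopA days.toNat 0 startingDayWeekly

-- ===== PORT B =====
def weeklyCalc_alt (boolWeekly : Bool) (days : Int) (startingDayWeekly : Int) : Int :=
  if !boolWeekly || days ≤ 0 then 0
  else
    let first := max 1 (8 - startingDayWeekly)
    let bonuses := if days < first then 0 else 1 + PySem.Int.floordiv (days - first) 7
    7 * days + 10 * bonuses

-- ===== PRECONDITION & SPEC =====
def Spec_weeklyCalc (boolWeekly : Bool) (days : Int) (startingDayWeekly : Int) (out : Int) : Prop := out = weeklyCalc_alt boolWeekly days startingDayWeekly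
instance (boolWeekly : Bool) (days : Int) (startingDayWeekly : Int) (out : Int) : Decidable (Spec_weeklyCalc boolWeekly days startingDayWeekly out) := by unfold Spec_weeklyCalc; infer_instance

-- ===== CLAIM (what is proved, stated in full; the proofs are below) =====
def Claim_equal_weeklyCalc : Prop := ∀ (boolWeekly : Bool) (days : Int) (startingDayWeekly : Int), Dom_weeklyCalc boolWeekly days startingDayWeekly → Spec_weeklyCalc boolWeekly days startingDayWeekly (weeklyCalc boolWeekly days startingDayWeekly)

-- ===== LEMMAS AND PROOFS =====

-- closed form of the number of bonuses the loop grants in n remaining iterations, starting at `day`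
def bonusCnt (n : Int) (day : Int) : Int :=
  if n < max 1 (8 - day) then 0 else 1 + (n - max 1 (8 - day)) / 7

theorem weeklyLoopA_eq (n : Nat) : ∀ gems day : Int,
    weeklyLoopA n gems day = gems + 7 * (n : Int) + 10 * bonusCnt (n : Int) day := by
  induction n with
  | zero =>
    intro gems day
    simp only [weeklyLoopA, bonusCnt]
    split_ifs <;> push_cast <;> omega
  | succ n ih =>
    intro gems day
    simp only [weeklyLoopA]
    split_ifs with h <;> rw [ih] <;> simp only [bonusCnt] <;> split_ifs <;> push_cast <;> omega

theorem weeklyCalc_spec : Claim_equal_weeklyCalc := by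
  intro b days start _
  unfold Spec_weeklyCalc weeklyCalc weeklyCalc_alt
  cases b with
  | false => simp
  | true =>
    simp only [Bool.not_true, Bool.false_or, if_neg (by simp : ¬(false = true))]
    by_cases hd : days ≤ 0
    · have : days.toNat = 0 := by omega
      rw [this, if_pos (by simpa using hd)]
      simp [weeklyLoopA]
    · rw [if_neg (by simpa using hd)]
      rw [weeklyLoopA_eq]
      have hc : ((days.toNat : Int)) = days := by omega
      rw [hc]
      simp only [bonusCnt]
      rw [PySem.Int.floordiv_eq_ediv_of_pos (by norm_num)]
      split_ifs <;> omega
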